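-- pv_equiv track=rewrite | github.com/onlyrootaccess/mickey_ai | modules/humor/personality_traits.py | _apply_user_preferences
-- ===== SOURCE A (Python) =====
-- from typing import Dict, List, Optional, Any
--
-- def _apply_user_preferences(styles: List[str], user_profile: Dict) -> List[str]:
--     """Adjust style selection based on user preferences"""
--     if not user_profile:
--         return styles
--
--     user_preferences = user_profile.get('preferred_styles', [])
--     disliked_styles = user_profile.get('disliked_styles', [])
--
--     # Boost preferred styles
--     preferred_styles = []
--     other_styles = []
--
--     for style in styles:
--         if style in user_preferences:
--             preferred_styles.append(style)
--         elif style not in disliked_styles: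
--             other_styles.append(style)
--
--     return preferred_styles + other_styles
-- ===== SOURCE B (Python) =====
-- def _apply_user_preferences(styles, user_profile):
--     """Adjust style selection based on user preferences"""
--     if not user_profile:
--         return styles
--
--     preferred = user_profile.get('preferred_styles', [])
--     disliked = user_profile.get('disliked_styles', [])
--
--     # Keep everything except styles that are disliked and not preferred,
--     # then stably rank preferred styles before the rest.
--     kept = [s for s in styles if s in preferred or s not in disliked]
--     return sorted(kept, key=lambda s: 0 if s in preferred else 1)
-- ===== Notes on version B (the rewrite author's own statement) =====
-- stated objective: alternative
-- what changed: Replaces the explicit two-bucket partition loop with a filter comprehension followed by a stable sort on a 0/1 preference key.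
import Mathlib
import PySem

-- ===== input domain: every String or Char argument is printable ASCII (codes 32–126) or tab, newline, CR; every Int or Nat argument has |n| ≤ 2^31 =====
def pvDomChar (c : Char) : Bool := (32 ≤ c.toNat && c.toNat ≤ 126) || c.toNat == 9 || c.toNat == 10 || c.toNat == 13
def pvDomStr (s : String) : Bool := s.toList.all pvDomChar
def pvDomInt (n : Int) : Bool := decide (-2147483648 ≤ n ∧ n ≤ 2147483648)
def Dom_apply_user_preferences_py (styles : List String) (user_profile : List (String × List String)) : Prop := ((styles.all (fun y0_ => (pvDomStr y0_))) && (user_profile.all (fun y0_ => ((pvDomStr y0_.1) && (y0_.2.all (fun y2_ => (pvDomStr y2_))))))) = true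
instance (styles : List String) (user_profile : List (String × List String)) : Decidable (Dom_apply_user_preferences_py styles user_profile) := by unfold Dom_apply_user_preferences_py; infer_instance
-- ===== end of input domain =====

-- B replaces A's explicit two-bucket partition loop by filtering the kept styles
-- and stably sorting them on a 0/1 preference key (objective: alternative).

-- ===== PORT A =====
def apply_user_preferences_py (styles : List String) (user_profile : List (String × List String)) : List String :=
  if user_profile = [] then styles
  else
    let user_preferences := PySem.Dict.getD (PySem.Dict.mk user_profile) "preferred_styles" []
    let disliked_styles := PySem.Dict.getD (PySem.Dict.mk user_profile) "disliked_styles" []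
    let r := styles.foldl (fun (acc : List String × List String) style =>
      if style ∈ user_preferences then (acc.1 ++ [style], acc.2)
      else if style ∉ disliked_styles then (acc.1, acc.2 ++ [style])
      else acc) ([], [])
    r.1 ++ r.2

-- ===== PORT B =====
def apply_user_preferences_py_alt (styles : List String) (user_profile : List (String × List String)) : List String :=
  if user_profile = [] then styles
  else
    let preferred := PySem.Dict.getD (PySem.Dict.mk user_profile) "preferred_styles" []
    let disliked := PySem.Dict.getD (PySem.Dict.mk user_profile) "disliked_styles" []
    let kept := styles.filter (fun s => decide (s ∈ preferred) || !decide (s ∈ disliked))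
    PySem.List.sorted kept (fun s => if s ∈ preferred then (0 : Int) else 1) false

-- ===== PRECONDITION & SPEC =====
def Spec_apply_user_preferences_py (styles : List String) (user_profile : List (String × List String)) (out : List String) : Prop := out = apply_user_preferences_py_alt styles user_profile
instance (styles : List String) (user_profile : List (String × List String)) (out : List String) : Decidable (Spec_apply_user_preferences_py styles user_profile out) := by unfold Spec_apply_user_preferences_py; infer_instance

-- ===== CLAIM (what is proved, stated in full; the proofs are below) =====
def Claim_equal_apply_user_preferences_py : Prop := ∀ (styles : List String) (user_profile : List (String × List String)), Dom_apply_user_preferences_py styles user_profile → Spec_apply_user_preferences_py styles user_profile (apply_user_preferences_py styles user_profile)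

-- ===== LEMMAS AND PROOFS =====

-- A's partition loop, characterised by two filters.
theorem pvA_foldl (pref dis : List String) (xs : List String) (p q : List String) :
    xs.foldl (fun (acc : List String × List String) style =>
      if style ∈ pref then (acc.1 ++ [style], acc.2)
      else if style ∉ dis then (acc.1, acc.2 ++ [style])
      else acc) (p, q)
    = (p ++ xs.filter (fun s => decide (s ∈ pref)),
       q ++ xs.filter (fun s => !decide (s ∈ pref) && !decide (s ∈ dis))) := by
  induction xs generalizing p q with
  | nil => simp
  | cons x xs ih =>
    rw [List.foldl_cons]
    by_cases hx : x ∈ pref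
    · rw [if_pos hx, show (((p, q).1 ++ [x], (p, q).2) : List String × List String) = (p ++ [x], q) from rfl, ih]
      simp [hx]
    · by_cases hd : x ∈ dis
      · rw [if_neg hx, if_neg (not_not_intro hd), ih]
        simp [hx, hd]
      · rw [if_neg hx, if_pos hd, show (((p, q).1, (p, q).2 ++ [x]) : List String × List String) = (p, q ++ [x]) from rfl, ih]
        simp [hx, hd]

-- insertBy skips a prefix it does not go before
theorem pvInsertBy_append (bef : String → String → Bool) (x : String) (p q : List String)
    (hp : ∀ y ∈ p, bef x y = false) :
    PySem.List.insertBy bef x (p ++ q) = p ++ PySem.List.insertBy bef x q := by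
  induction p with
  | nil => simp
  | cons y p ih =>
    have hy := hp y (by simp)
    simp [PySem.List.insertBy, hy, ih (fun z hz => hp z (by simp [hz]))]

-- insertBy goes in front of a block it precedes
theorem pvInsertBy_front (bef : String → String → Bool) (x : String) (q : List String)
    (hq : ∀ y ∈ q, bef x y = true) :
    PySem.List.insertBy bef x q = x :: q := by
  cases q with
  | nil => simp [PySem.List.insertBy]
  | cons y q => simp [PySem.List.insertBy, hq y (by simp)]

-- B's insertion sort with the 0/1 key, characterised as the same two blocks.
theorem pvB_foldl (pref : List String) (xs p q : List String)
    (hp : ∀ y ∈ p, y ∈ pref) (hq : ∀ y ∈ q, y ∉ pref) :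
    xs.foldl (fun acc x =>
        PySem.List.insertBy (fun a b =>
          decide ((if a ∈ pref then (0 : Int) else 1) < (if b ∈ pref then (0 : Int) else 1))) x acc)
      (p ++ q)
    = (p ++ xs.filter (fun s => decide (s ∈ pref))) ++ (q ++ xs.filter (fun s => !decide (s ∈ pref))) := by
  induction xs generalizing p q with
  | nil => simp
  | cons x xs ih =>
    rw [List.foldl_cons]
    by_cases hx : x ∈ pref
    · rw [pvInsertBy_append _ _ p q (fun y hy => by simp [hx, hp y hy]),
        pvInsertBy_front _ _ q (fun y hy => by simp [hx, hq y hy]),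
        show p ++ x :: q = (p ++ [x]) ++ q by simp]
      have hp' : ∀ y ∈ p ++ [x], y ∈ pref := by
        intro y hy
        rcases List.mem_append.1 hy with h | h
        · exact hp y h
        · simp at h; subst h; exact hx
      rw [ih (p ++ [x]) q hp' hq]
      simp [hx]
    · have hnb : ∀ y ∈ p ++ q,
          (fun a b => decide ((if a ∈ pref then (0 : Int) else 1) < (if b ∈ pref then (0 : Int) else 1))) x y = false := by
        intro y _
        by_cases hy' : y ∈ pref <;> simp [hx, hy']
      rw [PySem.List.insertBy_of_forall_not_before _ _ (p ++ q) hnb, List.append_assoc]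
      have hq' : ∀ y ∈ q ++ [x], y ∉ pref := by
        intro y hy
        rcases List.mem_append.1 hy with h | h
        · exact hq y h
        · simp at h; subst h; exact hx
      rw [ih p (q ++ [x]) hp hq']
      simp [hx]

-- ===== VERDICT (by name: the statement is the Claim_ definition above) =====
theorem apply_user_preferences_py_spec : Claim_equal_apply_user_preferences_py := by
  intro styles user_profile _
  unfold Spec_apply_user_preferences_py apply_user_preferences_py apply_user_preferences_py_alt
  by_cases h : user_profile = []
  · simp [h]
  · simp only [if_neg h]
    set pref := PySem.Dict.getD (PySem.Dict.mk user_profile) "preferred_styles" [] with hpref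
    set dis := PySem.Dict.getD (PySem.Dict.mk user_profile) "disliked_styles" [] with hdis
    rw [pvA_foldl pref dis styles [] [], PySem.List.sorted_eq_foldl_insertBy]
    rw [show (List.foldl _ ([] : List String) _ : List String) =
        List.foldl (fun acc x =>
          PySem.List.insertBy (fun a b =>
            decide ((if a ∈ pref then (0 : Int) else 1) < (if b ∈ pref then (0 : Int) else 1))) x acc)
          (([] : List String) ++ ([] : List String))
          (styles.filter (fun s => decide (s ∈ pref) || !decide (s ∈ dis))) from rfl]
    rw [pvB_foldl pref _ [] [] (by simp) (by simp)]
    simp only [List.nil_append, List.filter_filter]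
    congr 1
    · exact (List.filter_congr (fun s _ => by by_cases hs : s ∈ pref <;> simp [hs])).symm
    · exact (List.filter_congr (fun s _ => by
        by_cases hs : s ∈ pref <;> by_cases hd : s ∈ dis <;> simp [hs, hd])).symm
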